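-- pv_equiv track=rewrite | github.com/beiluo-horizon/Machine-Learning-Model | result.py | get_clf_num
-- ===== SOURCE A (Python) =====
-- def get_clf_num(label):
--     found_label = []
--     for i in range(len(label)):
--         if label[i] in found_label:
--             continue
--         else:
--             found_label.append(label[i])
--     temp = len(found_label)
--     return temp
-- ===== SOURCE B (Python) =====
-- def get_clf_num(label):
--     s = sorted(label)
--     if not s:
--         return 0
--     c = 1
--     for i in range(1, len(s)):
--         if s[i] != s[i - 1]:
--             c += 1
--     return c
-- ===== Notes on version B (the rewrite author's own statement) =====
-- stated objective: faster
-- what changed: Counts distinct labels as group boundaries in a sorted copy (one pass after sorting) instead of maintaining a growing seen-list with a linear membership scan per element.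
import Mathlib
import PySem

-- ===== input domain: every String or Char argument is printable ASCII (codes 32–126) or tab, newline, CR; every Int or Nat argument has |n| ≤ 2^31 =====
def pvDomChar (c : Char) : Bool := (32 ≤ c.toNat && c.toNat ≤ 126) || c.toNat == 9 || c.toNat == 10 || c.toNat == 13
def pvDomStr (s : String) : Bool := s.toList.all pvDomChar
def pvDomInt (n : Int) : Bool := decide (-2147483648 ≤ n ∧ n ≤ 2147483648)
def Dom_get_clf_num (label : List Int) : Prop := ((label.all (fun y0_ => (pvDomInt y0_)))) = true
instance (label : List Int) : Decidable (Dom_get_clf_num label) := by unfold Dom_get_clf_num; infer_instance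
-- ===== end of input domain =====

-- B counts distinct labels as group boundaries in a sorted copy (O(n log n)) instead of A's
-- seen-list with a linear membership test per element (O(n^2)).

-- ===== PORT A =====
-- the loop over range(len(label)) reading label[i] is ported as a fold over label itself
def get_clf_num (label : List Int) : Int :=
  let found := label.foldl (fun acc x => if acc.contains x then acc else acc ++ [x]) []
  (found.length : Int)

-- ===== PORT B =====
-- the one-pass loop 'for i in range(1, len(s)): if s[i] != s[i-1]: c += 1' as a recursion
-- carrying the previous element
def pvBound : Int → List Int → Int
  | _, [] => 0
  | prev, x :: xs => (if x ≠ prev then 1 else 0) + pvBound x xs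

def get_clf_num_alt (label : List Int) : Int :=
  match PySem.List.sorted label (fun x => x) false with
  | [] => 0
  | h :: t => 1 + pvBound h t

-- ===== PRECONDITION & SPEC =====
def Spec_get_clf_num (label : List Int) (out : Int) : Prop := out = get_clf_num_alt label
instance (label : List Int) (out : Int) : Decidable (Spec_get_clf_num label out) := by unfold Spec_get_clf_num; infer_instance

-- ===== CLAIM (what is proved, stated in full; the proofs are below) =====
def Claim_equal_get_clf_num : Prop := ∀ (label : List Int), Dom_get_clf_num label → Spec_get_clf_num label (get_clf_num label)

-- ===== LEMMAS AND PROOFS =====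

-- A's fold builds a nodup list whose elements are exactly those of label ∪ acc
theorem pvFound_invariant (label : List Int) :
    ∀ acc : List Int, acc.Nodup →
      (label.foldl (fun acc x => if acc.contains x then acc else acc ++ [x]) acc).Nodup ∧
      (label.foldl (fun acc x => if acc.contains x then acc else acc ++ [x]) acc).toFinset
        = acc.toFinset ∪ label.toFinset := by
  induction label with
  | nil => intro acc h; simpa using h
  | cons y ys ih =>
    intro acc h
    simp only [List.foldl_cons]
    by_cases hy : acc.contains y
    · have hmem : y ∈ acc := by simpa using hy
      rw [if_pos hy]
      obtain ⟨h1, h2⟩ := ih acc h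
      refine ⟨h1, ?_⟩
      rw [h2]
      ext z
      simp only [Finset.mem_union, List.mem_toFinset, List.mem_cons]
      constructor
      · rintro (hz | hz)
        · exact Or.inl hz
        · exact Or.inr (Or.inr hz)
      · rintro (hz | hz | hz)
        · exact Or.inl hz
        · exact Or.inl (hz ▸ hmem)
        · exact Or.inr hz
    · have hmem : y ∉ acc := by simpa using hy
      rw [if_neg hy]
      have hnd : (acc ++ [y]).Nodup := by
        simp [List.nodup_append, h]
        exact fun a ha e => hmem (e ▸ ha)
      obtain ⟨h1, h2⟩ := ih (acc ++ [y]) hnd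
      refine ⟨h1, ?_⟩
      rw [h2]
      ext z
      simp only [Finset.mem_union, List.mem_toFinset, List.mem_append, List.mem_cons]
      tauto

theorem get_clf_num_eq_card (label : List Int) :
    get_clf_num label = (label.toFinset.card : Int) := by
  obtain ⟨h1, h2⟩ := pvFound_invariant label [] (by simp)
  simp only [get_clf_num]
  rw [← List.toFinset_card_of_nodup h1, h2]
  simp

-- for a chain-sorted list, 1 + boundary count = number of distinct elements
theorem pvBound_card : ∀ (t : List Int) (h : Int), (h :: t).Pairwise (· ≤ ·) →
    1 + pvBound h t = ((h :: t).toFinset.card : Int) := by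
  intro t
  induction t with
  | nil => intro h _; simp [pvBound]
  | cons x xs ih =>
    intro h hp
    have hp' : (x :: xs).Pairwise (· ≤ ·) := hp.tail
    have hhx : h ≤ x := (List.pairwise_cons.mp hp).1 x (by simp)
    by_cases hx : x = h
    · subst hx
      have hb : pvBound x (x :: xs) = pvBound x xs := by simp [pvBound]
      have hfe : (x :: x :: xs).toFinset = (x :: xs).toFinset := by
        ext z; simp
      rw [hb, hfe, ih x hp']
    · have hlt : h < x := lt_of_le_of_ne hhx (fun e => hx e.symm)
      have hnotin : h ∉ (x :: xs) := by
        intro hmem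
        rcases List.mem_cons.mp hmem with he | hmem'
        · exact absurd he.symm hx
        · have := (List.pairwise_cons.mp hp').1 h hmem'
          omega
      have hb : pvBound h (x :: xs) = 1 + pvBound x xs := by simp [pvBound, hx]
      rw [hb]
      have hcard : ((h :: x :: xs).toFinset.card) = (x :: xs).toFinset.card + 1 := by
        simp only [List.toFinset_cons (a := h)]
        rw [Finset.card_insert_of_notMem (by simpa using hnotin)]
      rw [hcard]
      push_cast
      rw [← ih x hp']
      ring

theorem get_clf_num_alt_eq_card (label : List Int) :
    get_clf_num_alt label = (label.toFinset.card : Int) := by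
  simp only [get_clf_num_alt]
  cases hs : PySem.List.sorted label (fun x => x) false with
  | nil =>
    have : label = [] := (PySem.List.sorted_eq_nil_iff label (fun x => x) false).mp hs
    subst this; simp
  | cons h t =>
    have hperm : (PySem.List.sorted label (fun x => x) false).Perm label :=
      PySem.List.sorted_perm label (fun x => x) false
    have hpw : (PySem.List.sorted label (fun x => x) false).Pairwise (fun a b => a ≤ b) :=
      PySem.List.sorted_pairwise label (fun x => x)
    rw [hs] at hperm hpw
    show 1 + pvBound h t = _
    rw [pvBound_card t h hpw, List.toFinset_eq_of_perm _ _ hperm]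

-- ===== VERDICT (by name: the statement is the Claim_ definition above) =====
theorem get_clf_num_spec : Claim_equal_get_clf_num := by
  intro label _
  unfold Spec_get_clf_num
  rw [get_clf_num_eq_card, get_clf_num_alt_eq_card]
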